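-- pv_equiv track=rewrite | github.com/TurnaboutHero/Vainglory_REVERSE_ENGINEERING | vg/analysis/item_upgrade_tree.py | trace_player_builds
-- ===== SOURCE A (Python) =====
-- from collections import defaultdict, Counter
--
-- def trace_player_builds(events, eid_map):
--     """
--     For each player, trace the purchase sequence with costs.
--     Pair each acquire event with the nearest preceding cost event.
--     """
--     builds = {}  # player_name -> list of (item_id, cost, ts, qty)
--
--     # Group events by player
--     player_events = defaultdict(list)
--     for offset, etype, eid, data in events:
--         pinfo = eid_map.get(eid)
--         if pinfo:
--             player_events[pinfo['name']].append((offset, etype, data))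
--
--     for player_name, pevents in player_events.items():
--         build = []
--         last_cost = None
--         for offset, etype, data in pevents:
--             if etype == 'cost':
--                 last_cost = data['cost']
--             elif etype == 'acquire':
--                 cost = last_cost
--                 last_cost = None  # consume the cost
--                 build.append({
--                     'item_id': data['item_id'],
--                     'cost': cost,
--                     'ts': data.get('ts'),
--                     'qty': data['qty'],
--                 })
--         builds[player_name] = build
--     return builds
-- ===== SOURCE B (Python) =====
-- def trace_player_builds(events, eid_map):
--     """
--     Single pass over events: keep per-player running state (output list and
--     pending cost) in two dicts instead of grouping events by player first.
--     """
--     builds = {}     # player_name -> list of item dicts (the output)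
--     last_cost = {}  # player_name -> nearest preceding un-consumed cost
--     for offset, etype, eid, data in events:
--         pinfo = eid_map.get(eid)
--         if not pinfo:
--             continue
--         name = pinfo['name']
--         builds.setdefault(name, [])
--         if etype == 'cost':
--             last_cost[name] = data['cost']
--         elif etype == 'acquire':
--             cost = last_cost.get(name)
--             last_cost[name] = None  # consume the cost
--             builds[name].append({
--                 'item_id': data['item_id'],
--                 'cost': cost,
--                 'ts': data.get('ts'),
--                 'qty': data['qty'],
--             })
--     return builds
-- ===== Notes on version B (the rewrite author's own statement) =====
-- stated objective: simpler
-- what changed: Replaced the group-events-by-player-then-replay two-phase structure with a single pass over events that maintains per-player output lists and pending costs in two dicts, eliminating the intermediate player_events structure.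
import Mathlib
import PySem

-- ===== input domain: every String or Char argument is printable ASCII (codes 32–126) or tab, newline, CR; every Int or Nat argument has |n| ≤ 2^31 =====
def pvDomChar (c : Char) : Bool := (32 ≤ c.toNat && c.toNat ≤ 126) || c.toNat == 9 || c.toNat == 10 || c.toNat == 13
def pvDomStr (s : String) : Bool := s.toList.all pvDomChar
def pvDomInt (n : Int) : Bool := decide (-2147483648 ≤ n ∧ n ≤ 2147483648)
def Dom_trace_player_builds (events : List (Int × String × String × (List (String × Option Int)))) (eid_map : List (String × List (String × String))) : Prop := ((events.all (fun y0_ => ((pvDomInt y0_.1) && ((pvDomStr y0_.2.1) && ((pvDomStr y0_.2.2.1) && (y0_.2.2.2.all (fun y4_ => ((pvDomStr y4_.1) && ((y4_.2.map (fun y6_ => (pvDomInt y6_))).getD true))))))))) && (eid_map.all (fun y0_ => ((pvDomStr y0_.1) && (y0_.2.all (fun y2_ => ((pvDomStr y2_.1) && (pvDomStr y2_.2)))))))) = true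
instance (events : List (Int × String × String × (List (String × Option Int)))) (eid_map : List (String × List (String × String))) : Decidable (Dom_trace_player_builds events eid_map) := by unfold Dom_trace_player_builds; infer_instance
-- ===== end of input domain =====

-- B replaces A's group-by-player-then-replay two-phase structure by a single pass over
-- events keeping per-player output lists and pending costs in two dicts (objective: simpler).


-- shared helper: Python's `pinfo = eid_map.get(eid); if pinfo: ... pinfo['name']`
-- (both A and B contain these exact lines); `none` also covers the KeyError on a
-- truthy pinfo without 'name', which Pre_ excludes
def pvName (eid_map : List (String × List (String × String))) (eid : String) : Option String :=
  match (PySem.Dict.mk eid_map).get? eid with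
  | some pinfo => if pinfo = [] then none else (PySem.Dict.mk pinfo).get? "name"
  | none => none

-- shared helper: the item dict literal both A and B append (data['x'] ports as getD … none,
-- exact wherever the key is present — Pre_ excludes the KeyError cases; data.get('ts') is getD exactly)
def pvItem (data : List (String × Option Int)) (cost : Option Int) : List (String × Option Int) :=
  [("item_id", (PySem.Dict.mk data).getD "item_id" none), ("cost", cost),
   ("ts", (PySem.Dict.mk data).getD "ts" none), ("qty", (PySem.Dict.mk data).getD "qty" none)]

-- ===== PORT A =====
-- body of A's inner per-player loop, state = (build, last_cost)
def pvStepA (st : List (List (String × Option Int)) × Option Int)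
    (pev : Int × String × List (String × Option Int)) :
    List (List (String × Option Int)) × Option Int :=
  if pev.2.1 == "cost" then (st.1, (PySem.Dict.mk pev.2.2).getD "cost" none)
  else if pev.2.1 == "acquire" then (st.1 ++ [pvItem pev.2.2 st.2], none)
  else st

def pvBuild (pevs : List (Int × String × List (String × Option Int))) :
    List (List (String × Option Int)) × Option Int :=
  pevs.foldl pvStepA ([], none)

-- body of A's grouping loop: defaultdict(list) append
def pvGroupStep (eid_map : List (String × List (String × String)))
    (pe : PySem.Dict String (List (Int × String × List (String × Option Int))))
    (ev : Int × String × String × (List (String × Option Int))) :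
    PySem.Dict String (List (Int × String × List (String × Option Int))) :=
  match pvName eid_map ev.2.2.1 with
  | some name => pe.modify name [] (· ++ [(ev.1, ev.2.1, ev.2.2.2)])
  | none => pe

def trace_player_builds (events : List (Int × String × String × (List (String × Option Int)))) (eid_map : List (String × List (String × String))) : List (String × List (List (String × Option Int))) :=
  let player_events := events.foldl (pvGroupStep eid_map) PySem.Dict.empty
  (player_events.items.foldl
    (fun builds p => builds.insert p.1 (pvBuild p.2).1) PySem.Dict.empty).items

-- ===== PORT B =====
-- body of B's single loop, state = (builds, last_cost), both keyed by player name
def pvStepB (eid_map : List (String × List (String × String)))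
    (st : PySem.Dict String (List (List (String × Option Int))) × PySem.Dict String (Option Int))
    (ev : Int × String × String × (List (String × Option Int))) :
    PySem.Dict String (List (List (String × Option Int))) × PySem.Dict String (Option Int) :=
  match pvName eid_map ev.2.2.1 with
  | none => st
  | some name =>
    let builds := st.1.setdefault name []
    if ev.2.1 == "cost" then
      (builds, st.2.insert name ((PySem.Dict.mk ev.2.2.2).getD "cost" none))
    else if ev.2.1 == "acquire" then
      (builds.modify name [] (· ++ [pvItem ev.2.2.2 (st.2.getD name none)]),
       st.2.insert name none)
    else (builds, st.2)

def trace_player_builds_alt (events : List (Int × String × String × (List (String × Option Int)))) (eid_map : List (String × List (String × String))) : List (String × List (List (String × Option Int))) :=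
  (events.foldl (pvStepB eid_map) (PySem.Dict.empty, PySem.Dict.empty)).1.items

-- ===== PRECONDITION & SPEC =====
-- Pre_ excludes exactly the inputs on which the Python A raises KeyError: a routed event
-- whose truthy pinfo lacks 'name', a routed 'cost' event whose data lacks 'cost', or a
-- routed 'acquire' event whose data lacks 'item_id' or 'qty'. (B raises there too.)
def pvPreEv (eid_map : List (String × List (String × String)))
    (ev : Int × String × String × (List (String × Option Int))) : Bool :=
  match (PySem.Dict.mk eid_map).get? ev.2.2.1 with
  | none => true
  | some pinfo =>
    pinfo.isEmpty ||
      ((PySem.Dict.mk pinfo).contains "name" &&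
       (ev.2.1 != "cost" || (PySem.Dict.mk ev.2.2.2).contains "cost") &&
       (ev.2.1 != "acquire" ||
         ((PySem.Dict.mk ev.2.2.2).contains "item_id" && (PySem.Dict.mk ev.2.2.2).contains "qty")))

def Pre_trace_player_builds (events : List (Int × String × String × (List (String × Option Int)))) (eid_map : List (String × List (String × String))) : Prop :=
  events.all (pvPreEv eid_map) = true

instance (events : List (Int × String × String × (List (String × Option Int)))) (eid_map : List (String × List (String × String))) : Decidable (Pre_trace_player_builds events eid_map) := by unfold Pre_trace_player_builds; infer_instance

def pvWitness_trace_player_builds : (List (Int × String × String × (List (String × Option Int)))) × (List (String × List (String × String))) :=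
  ([(0, "cost", "e1", [("cost", some 300)]),
    (1, "acquire", "e1", [("item_id", some 5), ("qty", some 1)]),
    (2, "acquire", "e2", [("item_id", some 7), ("qty", some 2), ("ts", some 9)])],
   [("e1", [("name", "alice")]), ("e2", [("name", "bob")])])

def Spec_trace_player_builds (events : List (Int × String × String × (List (String × Option Int)))) (eid_map : List (String × List (String × String))) (out : List (String × List (List (String × Option Int)))) : Prop := out = trace_player_builds_alt events eid_map
instance (events : List (Int × String × String × (List (String × Option Int)))) (eid_map : List (String × List (String × String))) (out : List (String × List (List (String × Option Int)))) : Decidable (Spec_trace_player_builds events eid_map out) := by unfold Spec_trace_player_builds; infer_instance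

-- ===== CLAIM (what is proved, stated in full; the proofs are below) =====
def Claim_equal_trace_player_builds : Prop := ∀ (events : List (Int × String × String × (List (String × Option Int)))) (eid_map : List (String × List (String × String))), Dom_trace_player_builds events eid_map → Pre_trace_player_builds events eid_map → Spec_trace_player_builds events eid_map (trace_player_builds events eid_map)

-- ===== LEMMAS AND PROOFS =====

theorem pv_keys_of_items_map (d : PySem.Dict String (List (List (String × Option Int))))
    (pe : PySem.Dict String (List (Int × String × List (String × Option Int))))
    (h : d.items = pe.items.map (fun p => (p.1, (pvBuild p.2).1))) : d.keys = pe.keys := by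
  simp only [PySem.Dict.keys, h, List.map_map]
  rfl

theorem pv_contains_of_items_map (d : PySem.Dict String (List (List (String × Option Int))))
    (pe : PySem.Dict String (List (Int × String × List (String × Option Int))))
    (h : d.items = pe.items.map (fun p => (p.1, (pvBuild p.2).1))) (n : String) :
    d.contains n = pe.contains n := by
  rw [PySem.Dict.contains_eq_decide_mem_keys, PySem.Dict.contains_eq_decide_mem_keys,
    pv_keys_of_items_map d pe h]

theorem pv_val_of_mem (pe : PySem.Dict String (List (Int × String × List (String × Option Int))))
    (hnd : pe.keys.Nodup) (p : String × List (Int × String × List (String × Option Int)))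
    (hp : p ∈ pe.items) : pe.getD p.1 [] = p.2 :=
  PySem.Dict.getD_of_mem_items pe (by simpa using hp) hnd []

theorem pv_mem_of_contains (pe : PySem.Dict String (List (Int × String × List (String × Option Int))))
    (name : String) (hc : pe.contains name = true) :
    (name, pe.getD name []) ∈ pe.items := by
  have h1 : (pe.get? name).isSome := by
    rw [← PySem.Dict.contains_eq_isSome_get?]; exact hc
  obtain ⟨v, hv⟩ := Option.isSome_iff_exists.mp h1
  have hm := PySem.Dict.mem_items_of_get?_eq_some pe hv
  rwa [PySem.Dict.getD_of_get?_eq_some pe [] hv]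

theorem pv_groupNodup (eid_map : List (String × List (String × String))) :
    ∀ (events : List (Int × String × String × (List (String × Option Int))))
      (pe : PySem.Dict String (List (Int × String × List (String × Option Int)))),
      pe.keys.Nodup → (events.foldl (pvGroupStep eid_map) pe).keys.Nodup := by
  intro events
  induction events with
  | nil => intro pe h; simpa using h
  | cons ev evs ih =>
    intro pe h
    rw [List.foldl_cons]
    apply ih
    unfold pvGroupStep
    cases hn : pvName eid_map ev.2.2.1 with
    | none => simpa using h
    | some name =>
      simp only
      rw [PySem.Dict.keys_modify]
      exact PySem.Dict.nodup_keys_insert _ _ _ h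

theorem pv_A_items (pe : PySem.Dict String (List (Int × String × List (String × Option Int))))
    (hnd : pe.keys.Nodup) :
    (pe.items.foldl (fun b p => b.insert p.1 (pvBuild p.2).1) PySem.Dict.empty).items
      = pe.items.map (fun p => (p.1, (pvBuild p.2).1)) := by
  have h := PySem.Dict.items_foldl_insert_fresh pe.items (fun p => p.1)
    (fun p => (pvBuild p.2).1) PySem.Dict.empty
    (by intro a _; exact PySem.Dict.contains_empty _)
    (by simpa [PySem.Dict.keys] using hnd)
  simpa using h

theorem pv_invariant (eid_map : List (String × List (String × String))) :
    ∀ (events : List (Int × String × String × (List (String × Option Int))))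
      (pe : PySem.Dict String (List (Int × String × List (String × Option Int))))
      (st : PySem.Dict String (List (List (String × Option Int))) × PySem.Dict String (Option Int)),
      pe.keys.Nodup →
      st.1.items = pe.items.map (fun p => (p.1, (pvBuild p.2).1)) →
      (∀ n, st.2.getD n none = (pvBuild (pe.getD n [])).2) →
      (events.foldl (pvStepB eid_map) st).1.items
        = (events.foldl (pvGroupStep eid_map) pe).items.map (fun p => (p.1, (pvBuild p.2).1)) := by
  intro events
  induction events with
  | nil => intro pe st _ h1 _; simpa using h1
  | cons ev evs ih =>
    intro pe st h0 h1 h2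
    rw [List.foldl_cons, List.foldl_cons]
    cases hn : pvName eid_map ev.2.2.1 with
    | none =>
      simp only [pvStepB, pvGroupStep, hn]
      exact ih pe st h0 h1 h2
    | some name =>
      simp only [pvStepB, pvGroupStep, hn]
      have hcon := pv_contains_of_items_map st.1 pe h1
      have hnd1 : st.1.keys.Nodup := by rw [pv_keys_of_items_map st.1 pe h1]; exact h0
      have hpe'nd : (pe.modify name [] (· ++ [(ev.1, ev.2.1, ev.2.2.2)])).keys.Nodup := by
        rw [PySem.Dict.keys_modify]; exact PySem.Dict.nodup_keys_insert _ _ _ h0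
      have hgetD' : ∀ n, (pe.modify name [] (· ++ [(ev.1, ev.2.1, ev.2.2.2)])).getD n []
          = if n = name then pe.getD name [] ++ [(ev.1, ev.2.1, ev.2.2.2)] else pe.getD n [] := by
        intro n; rw [PySem.Dict.getD_modify]
      by_cases hb : ev.2.1 = "cost"
      case pos =>
        -- cost event: A appends it to the player's group, B only updates last_cost
        have hbeq : (ev.2.1 == "cost") = true := by simp [hb]
        refine ih _ _ hpe'nd ?_ ?_
        · simp only [hbeq, if_true]
          by_cases hc : pe.contains name = true
          case pos =>
            rw [PySem.Dict.setdefault_of_contains _ _ ((hcon name).trans hc)]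
            simp only [PySem.Dict.modify]
            rw [PySem.Dict.items_insert_of_contains _ _ hc, List.map_map, h1]
            apply List.map_congr_left
            intro p hp
            by_cases hpn : p.1 = name
            · have hv : pe.getD name [] = p.2 := by
                rw [← hpn]; exact pv_val_of_mem pe h0 p hp
              simp [Function.comp, hpn, ← hv, pvBuild, List.foldl_append, pvStepA, hbeq]
            · simp [Function.comp, hpn]
          case neg =>
            have hc' : pe.contains name = false := Bool.eq_false_iff.mpr hc
            have hcb : st.1.contains name = false := (hcon name).trans hc'
            rw [PySem.Dict.setdefault_of_not_contains _ _ hcb]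
            simp only [PySem.Dict.modify]
            rw [PySem.Dict.getD_of_not_contains _ _ hc',
              PySem.Dict.items_insert_of_not_contains _ _ hcb,
              PySem.Dict.items_insert_of_not_contains _ _ hc', List.map_append, h1]
            simp [pvBuild, pvStepA, hbeq]
        · intro n
          simp only [hbeq, if_true]
          rw [PySem.Dict.getD_insert, hgetD' n]
          by_cases hnn : n = name
          · simp [hnn, pvBuild, List.foldl_append, pvStepA, hbeq]
          · simp [hnn, h2 n]
      case neg =>
      by_cases ha : ev.2.1 = "acquire"
      case pos =>
        -- acquire event: both append the item dict to the player's build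
        have hbeq : (ev.2.1 == "cost") = false := by simp [hb]
        have haeq : (ev.2.1 == "acquire") = true := by simp [ha]
        have hlc : st.2.getD name none = (pvBuild (pe.getD name [])).2 := h2 name
        refine ih _ _ hpe'nd ?_ ?_
        · simp only [hbeq, haeq, if_true, Bool.false_eq_true, if_false]
          by_cases hc : pe.contains name = true
          case pos =>
            have hcb : st.1.contains name = true := (hcon name).trans hc
            rw [PySem.Dict.setdefault_of_contains _ _ hcb]
            have hmemB : (name, (pvBuild (pe.getD name [])).1) ∈ st.1.items := by
              rw [h1]
              exact List.mem_map.mpr ⟨(name, pe.getD name []), pv_mem_of_contains pe name hc, rfl⟩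
            have hgB : st.1.getD name [] = (pvBuild (pe.getD name [])).1 :=
              PySem.Dict.getD_of_mem_items st.1 hmemB hnd1 []
            simp only [PySem.Dict.modify]
            rw [hgB, hlc, PySem.Dict.items_insert_of_contains _ _ hcb,
              PySem.Dict.items_insert_of_contains _ _ hc, List.map_map, h1, List.map_map]
            apply List.map_congr_left
            intro p hp
            by_cases hpn : p.1 = name
            · simp [Function.comp, hpn, pvBuild, List.foldl_append, pvStepA, hbeq, haeq]
            · simp [Function.comp, hpn]
          case neg =>
            have hc' : pe.contains name = false := Bool.eq_false_iff.mpr hc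
            have hcb : st.1.contains name = false := (hcon name).trans hc'
            have hold0 : pe.getD name [] = [] := PySem.Dict.getD_of_not_contains _ _ hc'
            rw [PySem.Dict.setdefault_of_not_contains _ _ hcb]
            simp only [PySem.Dict.modify]
            rw [hlc, hold0, PySem.Dict.getD_insert_self, PySem.Dict.insert_insert_self,
              PySem.Dict.items_insert_of_not_contains _ _ hcb,
              PySem.Dict.items_insert_of_not_contains _ _ hc', List.map_append, h1]
            simp [pvBuild, pvStepA, hbeq, haeq]
        · intro n
          simp only [hbeq, haeq, if_true, Bool.false_eq_true, if_false]
          rw [PySem.Dict.getD_insert, hgetD' n]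
          by_cases hnn : n = name
          · simp [hnn, pvBuild, List.foldl_append, pvStepA, hbeq, haeq]
          · simp [hnn, h2 n]
      case neg =>
        -- any other event type: both sides leave the B-state / build unchanged
        have hbeq : (ev.2.1 == "cost") = false := by simp [hb]
        have haeq : (ev.2.1 == "acquire") = false := by simp [ha]
        refine ih _ _ hpe'nd ?_ ?_
        · simp only [hbeq, haeq, Bool.false_eq_true, if_false]
          by_cases hc : pe.contains name = true
          case pos =>
            rw [PySem.Dict.setdefault_of_contains _ _ ((hcon name).trans hc)]
            simp only [PySem.Dict.modify]
            rw [PySem.Dict.items_insert_of_contains _ _ hc, List.map_map, h1]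
            apply List.map_congr_left
            intro p hp
            by_cases hpn : p.1 = name
            · have hv : pe.getD name [] = p.2 := by
                rw [← hpn]; exact pv_val_of_mem pe h0 p hp
              simp [Function.comp, hpn, ← hv, pvBuild, List.foldl_append, pvStepA, hbeq, haeq]
            · simp [Function.comp, hpn]
          case neg =>
            have hc' : pe.contains name = false := Bool.eq_false_iff.mpr hc
            have hcb : st.1.contains name = false := (hcon name).trans hc'
            rw [PySem.Dict.setdefault_of_not_contains _ _ hcb]
            simp only [PySem.Dict.modify]
            rw [PySem.Dict.getD_of_not_contains _ _ hc',
              PySem.Dict.items_insert_of_not_contains _ _ hcb,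
              PySem.Dict.items_insert_of_not_contains _ _ hc', List.map_append, h1]
            simp [pvBuild, pvStepA, hbeq, haeq]
        · intro n
          simp only [hbeq, haeq, Bool.false_eq_true, if_false]
          rw [hgetD' n]
          by_cases hnn : n = name
          · simp [hnn, h2 name, pvBuild, List.foldl_append, pvStepA, hbeq, haeq]
          · simp [hnn, h2 n]

-- ===== VERDICT (by name: the statement is the Claim_ definition above) =====
theorem trace_player_builds_spec : Claim_equal_trace_player_builds := by
  intro events eid_map _ _
  unfold Spec_trace_player_builds trace_player_builds trace_player_builds_alt
  have hnd : (events.foldl (pvGroupStep eid_map) PySem.Dict.empty).keys.Nodup :=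
    pv_groupNodup eid_map events PySem.Dict.empty (by simp)
  rw [pv_A_items _ hnd]
  exact (pv_invariant eid_map events PySem.Dict.empty (PySem.Dict.empty, PySem.Dict.empty)
    (by simp) (by rfl)
    (by intro n; rfl)).symm
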